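-- pv_equiv track=rewrite | github.com/jihjihk/research-ai-swe-jobs | preprocessing/scripts/llm_shared.py | allocate_budget_across_days
-- ===== SOURCE A (Python) =====
-- import heapq
--
-- def allocate_budget_across_days(
--     uncached_per_day: dict[str, int],
--     cached_per_day: dict[str, int],
--     budget: int,
-- ) -> dict[str, int]:
--     """Water-fill `budget` across daily buckets, topping up the thinnest days first.
--
--     Each day's "level" starts at its cached count. We pop the lowest-level day,
--     add one unit, push it back at level+1, and repeat. Days with no uncached
--     capacity are never pushed. Ties break by day name for deterministic output.
--
--     Returns {day: number_allocated} with sum == budget, or sum < budget iff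
--     total capacity is exhausted.
--     """
--     if budget <= 0:
--         return {day: 0 for day in uncached_per_day}
--
--     allocation: dict[str, int] = {day: 0 for day in uncached_per_day}
--     # Heap entries: (current_level, day). Only days with uncached capacity.
--     heap = [
--         (cached_per_day.get(day, 0), day)
--         for day, capacity in uncached_per_day.items()
--         if capacity > 0
--     ]
--     heapq.heapify(heap)
--
--     remaining = budget
--     while remaining > 0 and heap:
--         level, day = heapq.heappop(heap)
--         allocation[day] += 1
--         remaining -= 1
--         if allocation[day] < uncached_per_day[day]:
--             heapq.heappush(heap, (level + 1, day))
--
--     return allocation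
-- ===== SOURCE B (Python) =====
-- def allocate_budget_across_days(
--     uncached_per_day: dict[str, int],
--     cached_per_day: dict[str, int],
--     budget: int,
-- ) -> dict[str, int]:
--     """Analytic water-fill: binary-search the water level, then hand out the
--     leftover units at that level in day-name order (no unit-by-unit loop)."""
--     allocation = {day: 0 for day in uncached_per_day}
--     if budget <= 0:
--         return allocation
--
--     days = [
--         (day, cached_per_day.get(day, 0), capacity)
--         for day, capacity in uncached_per_day.items()
--         if capacity > 0
--     ]
--     total = sum(capacity for _, _, capacity in days)
--     if budget >= total:
--         for day, _, capacity in days: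
--             allocation[day] = capacity
--         return allocation
--
--     # budget < total, so days is non-empty.  F(L) = units needed to raise every
--     # day to level L (capped); find the largest L with F(L) <= budget by binary
--     # search on [lo, hi) where F(lo) = 0 <= budget < total = F(hi).
--     lo = min(base for _, base, _ in days)
--     hi = max(base + capacity for _, base, capacity in days)
--     while hi - lo > 1:
--         mid = (lo + hi) // 2
--         if sum(min(capacity, max(0, mid - base)) for _, base, capacity in days) <= budget:
--             lo = mid
--         else:
--             hi = mid
--
--     used = 0
--     partial = []
--     for day, base, capacity in days:
--         a = min(capacity, max(0, lo - base))
--         allocation[day] = a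
--         used += a
--         if base <= lo < base + capacity:
--             partial.append(day)
--     for day in sorted(partial)[: budget - used]:
--         allocation[day] += 1
--     return allocation
-- ===== Notes on version B (the rewrite author's own statement) =====
-- stated objective: faster
-- what changed: A tops up days one unit at a time through a heap; B computes the final water level analytically (binary search on the largest level L with fill(L) <= budget), fills every day in closed form, and hands the leftover units at level L to the lexicographically smallest eligible day names.
import Mathlib
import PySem

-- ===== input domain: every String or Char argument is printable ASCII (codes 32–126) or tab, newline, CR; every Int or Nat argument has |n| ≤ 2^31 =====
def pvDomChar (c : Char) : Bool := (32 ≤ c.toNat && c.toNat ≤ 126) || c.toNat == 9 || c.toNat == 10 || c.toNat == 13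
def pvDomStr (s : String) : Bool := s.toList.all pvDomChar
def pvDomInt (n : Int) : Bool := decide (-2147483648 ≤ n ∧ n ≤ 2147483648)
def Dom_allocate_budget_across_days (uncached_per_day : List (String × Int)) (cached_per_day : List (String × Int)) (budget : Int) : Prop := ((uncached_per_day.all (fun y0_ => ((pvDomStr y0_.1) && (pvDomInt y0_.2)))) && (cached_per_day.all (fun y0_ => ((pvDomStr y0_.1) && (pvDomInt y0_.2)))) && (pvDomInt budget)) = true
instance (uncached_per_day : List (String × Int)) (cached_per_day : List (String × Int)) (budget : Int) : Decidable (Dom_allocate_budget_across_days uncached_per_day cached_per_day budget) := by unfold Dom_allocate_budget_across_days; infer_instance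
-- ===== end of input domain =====

-- B replaces A's unit-by-unit heap loop by an analytic water-level computation:
-- binary-search the largest level L with fill(L) <= budget, fill every day in closed
-- form, and hand the leftover units at level L out in day-name order.

-- ===== PORT A =====
-- Python's tuple '<' on the (level, day) heap entries (Int then String, lexicographic).
def pvLexLt (a b : Int × String) : Bool :=
  decide (a.1 < b.1) || (a.1 == b.1 && decide (a.2 < b.2))

-- heapq modelled by its observable contract: heappop returns the minimal entry.
-- Heap entries are (level, day) pairs with pairwise-distinct days, so the minimum is
-- a uniquely determined value and the heap's internal array layout is unobservable.
def pvHeapMin : List (Int × String) → Option (Int × String)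
  | [] => none
  | x :: xs => some (xs.foldl (fun m y => if pvLexLt y m then y else m) x)

-- the 'while remaining > 0 and heap' loop; fuel = remaining (it decreases by 1 each turn)
def pvALoop (ud : PySem.Dict String Int) :
    Nat → PySem.Dict String Int → List (Int × String) → PySem.Dict String Int
  | 0, alloc, _ => alloc
  | n + 1, alloc, heap =>
    match pvHeapMin heap with
    | none => alloc
    | some (level, day) =>
      let rest := heap.erase (level, day)
      let alloc' := alloc.modify day 0 (· + 1)
      -- uncached_per_day[day]: the key is always present (day came from uncached_per_day)
      if alloc'.getD day 0 < ud.getD day 0 then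
        pvALoop ud n alloc' ((level + 1, day) :: rest)
      else
        pvALoop ud n alloc' rest

def allocate_budget_across_days (uncached_per_day : List (String × Int)) (cached_per_day : List (String × Int)) (budget : Int) : List (String × Int) :=
  let ud := PySem.Dict.ofList uncached_per_day
  if budget ≤ 0 then
    (PySem.Dict.ofList (ud.keys.map (fun day => (day, (0 : Int))))).items
  else
    let cd := PySem.Dict.ofList cached_per_day
    let alloc := PySem.Dict.ofList (ud.keys.map (fun day => (day, (0 : Int))))
    let heap := (ud.items.filter (fun p => decide (0 < p.2))).map (fun p => (cd.getD p.1 0, p.1))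
    (pvALoop ud budget.toNat alloc heap).items

-- ===== PORT B =====
-- one day's closed-form fill up to level L: min(capacity, max(0, L - base))
def pvTerm (L : Int) (t : String × Int × Int) : Int := min t.2.2 (max 0 (L - t.2.1))

-- F(L) = sum(min(capacity, max(0, L - base)) for ...): units needed to reach level L
def pvF (days : List (String × Int × Int)) (L : Int) : Int := (days.map (pvTerm L)).sum

-- the 'while hi - lo > 1' binary search for the largest L with F(L) <= budget
def pvBSearch (days : List (String × Int × Int)) (budget : Int) (lo hi : Int) : Int :=
  if h : 1 < hi - lo then
    let mid := PySem.Int.floordiv (lo + hi) 2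
    if pvF days mid ≤ budget then pvBSearch days budget mid hi
    else pvBSearch days budget lo mid
  else lo
termination_by (hi - lo).toNat
decreasing_by
  · have h1 : lo + 1 ≤ PySem.Int.floordiv (lo + hi) 2 :=
      (PySem.Int.le_floordiv_iff_mul_le (by norm_num)).mpr (by omega)
    have h2 : PySem.Int.floordiv (lo + hi) 2 < hi :=
      (PySem.Int.floordiv_lt_iff_lt_mul (by norm_num)).mpr (by omega)
    simp only [mid] at *; omega
  · have h1 : lo + 1 ≤ PySem.Int.floordiv (lo + hi) 2 :=
      (PySem.Int.le_floordiv_iff_mul_le (by norm_num)).mpr (by omega)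
    have h2 : PySem.Int.floordiv (lo + hi) 2 < hi :=
      (PySem.Int.floordiv_lt_iff_lt_mul (by norm_num)).mpr (by omega)
    simp only [mid] at *; omega

def allocate_budget_across_days_alt (uncached_per_day : List (String × Int)) (cached_per_day : List (String × Int)) (budget : Int) : List (String × Int) :=
  let ud := PySem.Dict.ofList uncached_per_day
  let alloc0 := PySem.Dict.ofList (ud.keys.map (fun day => (day, (0 : Int))))
  if budget ≤ 0 then alloc0.items
  else
    let cd := PySem.Dict.ofList cached_per_day
    let days := (ud.items.filter (fun p => decide (0 < p.2))).map
      (fun p => (p.1, cd.getD p.1 0, p.2))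
    let total := (days.map (fun t => t.2.2)).sum
    if total ≤ budget then
      (days.foldl (fun al t => al.insert t.1 t.2.2) alloc0).items
    else
      -- min(...) / max(...) over a non-empty list (budget < total forces days ≠ []);
      -- PySem.List.minD/maxD are the total forms of Python's min/max
      let lo := PySem.List.minD (days.map (fun t => t.2.1)) (fun x => x) 0
      let hi := PySem.List.maxD (days.map (fun t => t.2.1 + t.2.2)) (fun x => x) 0
      let L := pvBSearch days budget lo hi
      let fin := days.foldl
        (fun (st : PySem.Dict String Int × Int × List String) t =>
          (st.1.insert t.1 (pvTerm L t), st.2.1 + pvTerm L t,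
           if t.2.1 ≤ L ∧ L < t.2.1 + t.2.2 then st.2.2 ++ [t.1] else st.2.2))
        (alloc0, 0, [])
      let chosen := PySem.List.slice (PySem.List.sorted fin.2.2 (fun x => x) false)
        none (some (budget - fin.2.1))
      (chosen.foldl (fun al day => al.modify day 0 (· + 1)) fin.1).items

-- ===== PRECONDITION & SPEC =====
def Spec_allocate_budget_across_days (uncached_per_day : List (String × Int)) (cached_per_day : List (String × Int)) (budget : Int) (out : List (String × Int)) : Prop := out = allocate_budget_across_days_alt uncached_per_day cached_per_day budget
instance (uncached_per_day : List (String × Int)) (cached_per_day : List (String × Int)) (budget : Int) (out : List (String × Int)) : Decidable (Spec_allocate_budget_across_days uncached_per_day cached_per_day budget out) := by unfold Spec_allocate_budget_across_days; infer_instance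

-- ===== CLAIM (what is proved, stated in full; the proofs are below) =====
def Claim_equal_allocate_budget_across_days : Prop := ∀ (uncached_per_day : List (String × Int)) (cached_per_day : List (String × Int)) (budget : Int), Dom_allocate_budget_across_days uncached_per_day cached_per_day budget → Spec_allocate_budget_across_days uncached_per_day cached_per_day budget (allocate_budget_across_days uncached_per_day cached_per_day budget)

-- ===== LEMMAS AND PROOFS =====

-- proof-side vocabulary: a run is described by the per-day allocation function g
def pvBump (g : String → Int) (d : String) : String → Int := fun x => if x = d then g x + 1 else g x

def pvFrontier (days : List (String × Int × Int)) (g : String → Int) : List (Int × String) :=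
  (days.filter (fun t => decide (g t.1 < t.2.2))).map (fun t => (t.2.1 + g t.1, t.1))

def pvStepN (days : List (String × Int × Int)) : Nat → (String → Int) → (String → Int)
  | 0, g => g
  | n + 1, g =>
    match pvHeapMin (pvFrontier days g) with
    | none => g
    | some m => pvStepN days n (pvBump g m.2)

def pvStep1 (days : List (String × Int × Int)) (g : String → Int) : String → Int :=
  match pvHeapMin (pvFrontier days g) with
  | none => g
  | some m => pvBump g m.2

def pvEnt? (days : List (String × Int × Int)) (x : String) : Option (String × Int × Int) :=
  days.find? (fun t => t.1 == x)

def pvElig (days : List (String × Int × Int)) (L : Int) : List String :=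
  (days.filter (fun t => decide (t.2.1 ≤ L ∧ L < t.2.1 + t.2.2))).map (·.1)

def pvSElig (days : List (String × Int × Int)) (L : Int) : List String :=
  PySem.List.sorted (pvElig days L) (fun x => x) false

def pvAfun (days : List (String × Int × Int)) (L : Int) (r : Nat) : String → Int := fun x =>
  match pvEnt? days x with
  | none => 0
  | some t => pvTerm L t + (if x ∈ (pvSElig days L).take r then 1 else 0)

def pvCapfun (days : List (String × Int × Int)) : String → Int := fun x =>
  match pvEnt? days x with
  | none => 0
  | some t => t.2.2

def pvTotal (days : List (String × Int × Int)) : Int := (days.map (fun t => t.2.2)).sum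

-- ------- small generic lemmas -------
theorem pv_sum_map_mono {α : Type} (l : List α) (f g : α → Int)
    (h : ∀ x ∈ l, f x ≤ g x) : (l.map f).sum ≤ (l.map g).sum := by
  induction l with
  | nil => simp
  | cons a l ih =>
    simp only [List.map_cons, List.sum_cons]
    have := h a (by simp)
    have := ih (fun x hx => h x (by simp [hx]))
    omega

theorem pv_eq_of_sum_eq {α : Type} (l : List α) (f g : α → Int)
    (hle : ∀ x ∈ l, f x ≤ g x) (hsum : (l.map f).sum = (l.map g).sum) :
    ∀ x ∈ l, f x = g x := by
  induction l with
  | nil => simp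
  | cons a l ih =>
    simp only [List.map_cons, List.sum_cons] at hsum
    have h1 := hle a (by simp)
    have h2 := pv_sum_map_mono l f g (fun x hx => hle x (by simp [hx]))
    intro x hx
    rcases List.mem_cons.mp hx with rfl | hx
    · omega
    · exact ih (fun y hy => hle y (by simp [hy])) (by omega) x hx

-- ------- pvTerm / pvF -------
theorem pvTerm_nonneg (L : Int) (t : String × Int × Int) (h : 0 < t.2.2) : 0 ≤ pvTerm L t := by
  simp only [pvTerm]; omega

theorem pvTerm_le_cap (L : Int) (t : String × Int × Int) : pvTerm L t ≤ t.2.2 := by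
  simp only [pvTerm]; omega

theorem pvTerm_mono {L L' : Int} (h : L ≤ L') (t : String × Int × Int) :
    pvTerm L t ≤ pvTerm L' t := by
  simp only [pvTerm]; omega

theorem pvTerm_succ (L : Int) (t : String × Int × Int) (h : 0 < t.2.2) :
    pvTerm (L + 1) t = pvTerm L t + (if t.2.1 ≤ L ∧ L < t.2.1 + t.2.2 then 1 else 0) := by
  simp only [pvTerm]; split_ifs <;> omega

theorem pvF_nonneg (days : List (String × Int × Int)) (hcap : ∀ t ∈ days, 0 < t.2.2) (L : Int) :
    0 ≤ pvF days L := by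
  induction days with
  | nil => simp [pvF]
  | cons a l ih =>
    simp only [pvF, List.map_cons, List.sum_cons] at *
    have h1 := pvTerm_nonneg L a (hcap a (by simp))
    have h2 := ih (fun t ht => hcap t (by simp [ht]))
    omega

theorem pvF_mono (days : List (String × Int × Int)) {L L' : Int} (h : L ≤ L') :
    pvF days L ≤ pvF days L' := by
  exact pv_sum_map_mono days _ _ (fun t _ => pvTerm_mono h t)

theorem pvF_le_total (days : List (String × Int × Int)) (L : Int) :
    pvF days L ≤ pvTotal days := by
  have := pv_sum_map_mono days (pvTerm L) (fun t => t.2.2) (fun t _ => pvTerm_le_cap L t)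
  simpa [pvF, pvTotal] using this

theorem pvF_succ (days : List (String × Int × Int)) (hcap : ∀ t ∈ days, 0 < t.2.2) (L : Int) :
    pvF days (L + 1) = pvF days L + (pvElig days L).length := by
  induction days with
  | nil => simp [pvF, pvElig]
  | cons a l ih =>
    have ha := hcap a (by simp)
    have ihl := ih (fun t ht => hcap t (by simp [ht]))
    have hstep : pvTerm (L + 1) a = pvTerm L a + (if a.2.1 ≤ L ∧ L < a.2.1 + a.2.2 then 1 else 0) :=
      pvTerm_succ L a ha
    by_cases hc : a.2.1 ≤ L ∧ L < a.2.1 + a.2.2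
    · simp only [pvF, pvElig, List.map_cons, List.sum_cons, List.filter_cons,
        decide_eq_true_eq] at *
      rw [if_pos hc] at *
      simp only [List.map_cons, List.length_cons] at *
      push_cast
      omega
    · simp only [pvF, pvElig, List.map_cons, List.sum_cons, List.filter_cons,
        decide_eq_true_eq] at *
      rw [if_neg hc] at *
      omega

-- ------- pvHeapMin -------
theorem pvLexLt_asymm_eq {a b : Int × String} (h1 : pvLexLt a b = false) (h2 : pvLexLt b a = false) :
    a = b := by
  simp only [pvLexLt, Bool.or_eq_false_iff, Bool.and_eq_false_iff,
    decide_eq_false_iff_not, beq_eq_false_iff_ne, beq_iff_eq] at h1 h2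
  rcases h1 with ⟨h1a, h1b⟩; rcases h2 with ⟨h2a, h2b⟩
  have e1 : a.1 = b.1 := le_antisymm (not_lt.mp h2a) (not_lt.mp h1a)
  have e2 : a.2 = b.2 := by
    rcases h1b with h | h
    · exact absurd e1 h
    · rcases h2b with h' | h'
      · exact absurd e1.symm h'
      · exact le_antisymm (not_lt.mp h') (not_lt.mp h)
  exact Prod.ext e1 e2

theorem pvLexLt_iff_toLex {a b : Int × String} : pvLexLt a b = true ↔ toLex a < toLex b := by
  simp [pvLexLt, Prod.Lex.lt_iff]

theorem pvLexLt_false_iff_toLex {a b : Int × String} :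
    pvLexLt a b = false ↔ toLex b ≤ toLex a := by
  rw [← Bool.not_eq_true, pvLexLt_iff_toLex.not, not_lt]

theorem pvHeapMin_spec {h : List (Int × String)} {m : Int × String}
    (hm : pvHeapMin h = some m) : m ∈ h ∧ ∀ x ∈ h, pvLexLt x m = false := by
  have aux : ∀ (xs : List (Int × String)) (x : Int × String),
      (xs.foldl (fun m y => if pvLexLt y m then y else m) x) ∈ x :: xs ∧
      ∀ y ∈ x :: xs, toLex (xs.foldl (fun m y => if pvLexLt y m then y else m) x) ≤ toLex y := by
    intro xs
    induction xs with
    | nil => intro x; simp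
    | cons z xs ih =>
      intro x
      simp only [List.foldl_cons]
      by_cases hzx : pvLexLt z x = true
      · rw [if_pos hzx]
        obtain ⟨hmem, hmin⟩ := ih z
        have hzx' := pvLexLt_iff_toLex.mp hzx
        refine ⟨?_, ?_⟩
        · rcases List.mem_cons.mp hmem with hh | hh
          · simp [hh]
          · simp [hh]
        · intro y hy
          rcases List.mem_cons.mp hy with rfl | hy
          · exact le_trans (hmin z (by simp)) (le_of_lt hzx')
          · exact hmin y (List.mem_cons.mpr (List.mem_cons.mp hy))
      · rw [if_neg (by simpa using hzx)]
        obtain ⟨hmem, hmin⟩ := ih x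
        have hzx' : toLex x ≤ toLex z :=
          pvLexLt_false_iff_toLex.mp (Bool.not_eq_true _ ▸ hzx)
        refine ⟨?_, ?_⟩
        · rcases List.mem_cons.mp hmem with hh | hh
          · simp [hh]
          · simp [hh]
        · intro y hy
          rcases List.mem_cons.mp hy with rfl | hy
          · exact hmin y (by simp)
          · rcases List.mem_cons.mp hy with rfl | hy2
            · exact le_trans (hmin x (by simp)) hzx'
            · exact hmin y (List.mem_cons.mpr (Or.inr hy2))
  cases h with
  | nil => simp [pvHeapMin] at hm
  | cons x xs =>
    simp only [pvHeapMin, Option.some.injEq] at hm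
    subst hm
    obtain ⟨h1, h2⟩ := aux xs x
    exact ⟨h1, fun y hy => pvLexLt_false_iff_toLex.mpr (h2 y hy)⟩

theorem pvHeapMin_eq {h : List (Int × String)} {m : Int × String}
    (hmem : m ∈ h) (hmin : ∀ x ∈ h, pvLexLt x m = false) : pvHeapMin h = some m := by
  cases h with
  | nil => simp at hmem
  | cons x xs =>
    obtain ⟨h1, h2⟩ := pvHeapMin_spec (h := x :: xs) (m := _) rfl
    have e : (xs.foldl (fun m y => if pvLexLt y m then y else m) x) = m :=
      (pvLexLt_asymm_eq (h2 m hmem) (hmin _ h1)).symm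
    simp [pvHeapMin, e]

theorem pvHeapMin_nil_iff {h : List (Int × String)} : pvHeapMin h = none ↔ h = [] := by
  cases h <;> simp [pvHeapMin]

-- ------- find? -------
theorem pvEnt?_self {days : List (String × Int × Int)}
    (hnd : (days.map (·.1)).Nodup) {t : String × Int × Int} (ht : t ∈ days) :
    pvEnt? days t.1 = some t := by
  induction days with
  | nil => simp at ht
  | cons a l ih =>
    simp only [List.map_cons, List.nodup_cons] at hnd
    rcases List.mem_cons.mp ht with rfl | ht
    · simp [pvEnt?, List.find?]
    · have hne : (a.1 == t.1) = false := by
        rw [beq_eq_false_iff_ne]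
        intro e
        exact hnd.1 (e ▸ List.mem_map_of_mem ht)
      simp only [pvEnt?, List.find?, hne]
      exact ih hnd.2 ht

theorem pvEnt?_eq_some {days : List (String × Int × Int)} {x : String} {t : String × Int × Int}
    (h : pvEnt? days x = some t) : t ∈ days ∧ t.1 = x := by
  exact ⟨List.mem_of_find?_eq_some h, by simpa using List.find?_some h⟩

theorem pvEnt?_eq_none {days : List (String × Int × Int)} {x : String}
    (h : ∀ t ∈ days, t.1 ≠ x) : pvEnt? days x = none := by
  rw [pvEnt?, List.find?_eq_none]
  intro t ht
  simpa using h t ht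

-- ------- frontier -------
theorem pv_mem_frontier {days : List (String × Int × Int)} {g : String → Int}
    {p : Int × String} :
    p ∈ pvFrontier days g ↔ ∃ t ∈ days, t.1 = p.2 ∧ g t.1 < t.2.2 ∧ p.1 = t.2.1 + g t.1 := by
  simp only [pvFrontier, List.mem_map, List.mem_filter, decide_eq_true_eq]
  constructor
  · rintro ⟨t, ⟨ht, hlt⟩, rfl⟩
    exact ⟨t, ht, rfl, hlt, rfl⟩
  · rintro ⟨t, ht, h1, h2, h3⟩
    refine ⟨t, ⟨ht, h2⟩, ?_⟩
    cases p
    simp_all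

theorem pvFrontier_append (l1 l2 : List (String × Int × Int)) (g : String → Int) :
    pvFrontier (l1 ++ l2) g = pvFrontier l1 g ++ pvFrontier l2 g := by
  simp [pvFrontier, List.filter_append]

theorem pvFrontier_cons (t : String × Int × Int) (l : List (String × Int × Int)) (g : String → Int) :
    pvFrontier (t :: l) g =
      (if g t.1 < t.2.2 then [(t.2.1 + g t.1, t.1)] else []) ++ pvFrontier l g := by
  simp only [pvFrontier, List.filter_cons]
  by_cases hc : g t.1 < t.2.2
  · rw [if_pos (by simpa using hc), if_pos hc]; simp
  · rw [if_neg (by simpa using hc), if_neg hc]; simp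

theorem pvFrontier_congr {l : List (String × Int × Int)} {g g' : String → Int}
    (h : ∀ t ∈ l, g t.1 = g' t.1) : pvFrontier l g = pvFrontier l g' := by
  unfold pvFrontier
  rw [List.filter_congr (fun t ht => by rw [h t ht])]
  exact List.map_congr_left (fun t ht => by rw [h t (List.mem_of_mem_filter ht)])

theorem pv_snd_mem_of_mem_frontier {l : List (String × Int × Int)} {g : String → Int}
    {p : Int × String} (hp : p ∈ pvFrontier l g) : p.2 ∈ l.map (·.1) := by
  rcases pv_mem_frontier.mp hp with ⟨t, ht, h1, _, _⟩
  exact h1 ▸ List.mem_map_of_mem ht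

theorem pvFrontier_bump_perm {days : List (String × Int × Int)}
    (hnd : (days.map (·.1)).Nodup) {t0 : String × Int × Int} (ht0 : t0 ∈ days)
    {g : String → Int} (hlt : g t0.1 < t0.2.2) :
    (pvFrontier days (pvBump g t0.1)).Perm
      ((if g t0.1 + 1 < t0.2.2 then [(t0.2.1 + g t0.1 + 1, t0.1)] else []) ++
        (pvFrontier days g).erase (t0.2.1 + g t0.1, t0.1)) := by
  obtain ⟨l1, l2, rfl⟩ := List.append_of_mem ht0
  have hnd' : ((l1.map (·.1)) ++ t0.1 :: (l2.map (·.1))).Nodup := by simpa using hnd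
  rcases List.nodup_append.mp hnd' with ⟨_, hb, hdisj⟩
  have h1 : t0.1 ∉ l1.map (·.1) := fun hm => hdisj t0.1 hm t0.1 (by simp) rfl
  have h2 : t0.1 ∉ l2.map (·.1) := (List.nodup_cons.mp hb).1
  have hne1 : ∀ t ∈ l1, pvBump g t0.1 t.1 = g t.1 := by
    intro t ht
    have : t.1 ≠ t0.1 := fun e => h1 (e ▸ List.mem_map_of_mem ht)
    simp [pvBump, this]
  have hne2 : ∀ t ∈ l2, pvBump g t0.1 t.1 = g t.1 := by
    intro t ht
    have : t.1 ≠ t0.1 := fun e => h2 (e ▸ List.mem_map_of_mem ht)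
    simp [pvBump, this]
  have hb0 : pvBump g t0.1 t0.1 = g t0.1 + 1 := by simp [pvBump]
  -- decompose both frontiers
  rw [pvFrontier_append, pvFrontier_cons, pvFrontier_append, pvFrontier_cons,
    pvFrontier_congr hne1, pvFrontier_congr hne2, hb0]
  rw [if_pos hlt]
  -- the erased entry is the head of the middle segment
  have hnot : (t0.2.1 + g t0.1, t0.1) ∉ pvFrontier l1 g := by
    intro hm
    exact h1 (pv_snd_mem_of_mem_frontier hm)
  rw [List.erase_append_right _ hnot]
  have : (((t0.2.1 + g t0.1, t0.1) :: []) ++ pvFrontier l2 g).erase (t0.2.1 + g t0.1, t0.1)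
      = pvFrontier l2 g := by
    simp [List.erase_cons_head]
  rw [this]
  -- now a pure permutation
  by_cases hc : g t0.1 + 1 < t0.2.2
  · rw [if_pos hc, if_pos (by simpa using hc)]
    have ea : t0.2.1 + (g t0.1 + 1) = t0.2.1 + g t0.1 + 1 := by ring
    rw [ea]
    exact List.perm_middle
  · rw [if_neg hc, if_neg (by simpa using hc)]
    simp

-- ------- pvStepN -------
theorem pvStepN_unfold (days : List (String × Int × Int)) (n : Nat) (g : String → Int) :
    pvStepN days (n + 1) g =
      (match pvHeapMin (pvFrontier days g) with
        | none => g
        | some m => pvStepN days n (pvBump g m.2)) := rfl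

theorem pvStepN_frontier_nil {days : List (String × Int × Int)} {g : String → Int}
    (h : pvFrontier days g = []) (n : Nat) : pvStepN days n g = g := by
  induction n with
  | zero => rfl
  | succ n ih => rw [pvStepN_unfold, h]; rfl

theorem pvStepN_succ (days : List (String × Int × Int)) (n : Nat) (g : String → Int) :
    pvStepN days (n + 1) g = pvStep1 days (pvStepN days n g) := by
  induction n generalizing g with
  | zero =>
    rw [pvStepN_unfold, pvStep1]
    have h0 : pvStepN days 0 g = g := rfl
    rw [h0]
    rcases h : pvHeapMin (pvFrontier days g) with _ | m <;> rfl
  | succ n ih =>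
    rw [pvStepN_unfold]
    rcases h : pvHeapMin (pvFrontier days g) with _ | m
    · rw [pvStepN_frontier_nil (pvHeapMin_nil_iff.mp h), pvStep1, h]
    · show pvStepN days (n + 1) (pvBump g m.2) = pvStep1 days (pvStepN days (n + 1) g)
      rw [ih, pvStepN_unfold, h]

-- ------- A's loop follows pvStepN -------
theorem pvALoop_sync (ud : PySem.Dict String Int) (days : List (String × Int × Int))
    (hud : ∀ t ∈ days, ud.getD t.1 0 = t.2.2)
    (hks : ∀ t ∈ days, t.1 ∈ ud.keys)
    (hnd : (days.map (·.1)).Nodup) :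
    ∀ (n : Nat) (g : String → Int) (alloc : PySem.Dict String Int) (heap : List (Int × String)),
      alloc.keys = ud.keys → (∀ x, alloc.getD x 0 = g x) → heap.Perm (pvFrontier days g) →
      (pvALoop ud n alloc heap).keys = ud.keys ∧
        ∀ x, (pvALoop ud n alloc heap).getD x 0 = pvStepN days n g x := by
  intro n
  induction n with
  | zero => exact fun g alloc heap hk hg hp => ⟨hk, fun x => hg x⟩
  | succ n ih =>
    intro g alloc heap hk hg hp
    rcases hmin : pvHeapMin heap with _ | m
    · have hnil : heap = [] := pvHeapMin_nil_iff.mp hmin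
      have hfr : pvFrontier days g = [] := by
        have : ([] : List (Int × String)).Perm (pvFrontier days g) := hnil ▸ hp
        exact (this.symm).eq_nil
      subst hnil
      simp only [pvALoop, pvHeapMin]
      exact ⟨hk, fun x => by rw [pvStepN_frontier_nil hfr, hg x]⟩
    · rcases m with ⟨ℓ, d⟩
      obtain ⟨hmem, hminim⟩ := pvHeapMin_spec hmin
      have hmf : (ℓ, d) ∈ pvFrontier days g := hp.mem_iff.mp hmem
      obtain ⟨t0, ht0, ht0n, hglt, hℓ⟩ := pv_mem_frontier.mp hmf
      simp only at ht0n hℓ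
      subst ht0n
      subst hℓ
      have hminf : ∀ x ∈ pvFrontier days g, pvLexLt x (t0.2.1 + g t0.1, t0.1) = false :=
        fun x hx => hminim x (hp.mem_iff.mpr hx)
      have hfmin : pvHeapMin (pvFrontier days g) = some (t0.2.1 + g t0.1, t0.1) :=
        pvHeapMin_eq hmf hminf
      have hstep : pvStepN days (n + 1) g = pvStepN days n (pvBump g t0.1) := by
        rw [pvStepN_unfold, hfmin]
      have hcont : alloc.contains t0.1 = true :=
        (PySem.Dict.contains_iff_mem_keys alloc t0.1).mpr (hk ▸ hks t0 ht0)
      have hk' : (alloc.modify t0.1 0 (· + 1)).keys = ud.keys := by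
        rw [PySem.Dict.keys_modify, PySem.Dict.keys_insert_of_contains alloc _ hcont, hk]
      have hg' : ∀ x, (alloc.modify t0.1 0 (· + 1)).getD x 0 = pvBump g t0.1 x := by
        intro x
        rw [PySem.Dict.getD_modify, pvBump]
        by_cases hx : x = t0.1
        · rw [if_pos hx, if_pos hx, hg t0.1, hx]
        · rw [if_neg hx, if_neg hx, hg x]
      have hgd : (alloc.modify t0.1 0 (· + 1)).getD t0.1 0 = g t0.1 + 1 := by
        rw [hg' t0.1, pvBump, if_pos rfl]
      have hudd : ud.getD t0.1 0 = t0.2.2 := hud t0 ht0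
      have hrest : (heap.erase (t0.2.1 + g t0.1, t0.1)).Perm
          ((pvFrontier days g).erase (t0.2.1 + g t0.1, t0.1)) := hp.erase _
      have hbp := pvFrontier_bump_perm hnd ht0 (g := g) hglt
      simp only [pvALoop, hmin]
      rw [hgd, hudd]
      rw [hstep]
      by_cases hc : g t0.1 + 1 < t0.2.2
      · rw [if_pos hc]
        rw [if_pos hc] at hbp
        have hperm' : ((t0.2.1 + g t0.1 + 1, t0.1) ::
            heap.erase (t0.2.1 + g t0.1, t0.1)).Perm (pvFrontier days (pvBump g t0.1)) :=
          List.Perm.trans (List.Perm.cons _ hrest) hbp.symm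
        exact ih (pvBump g t0.1) _ _ hk' hg' hperm'
      · rw [if_neg hc]
        rw [if_neg hc] at hbp
        have hperm' : (heap.erase (t0.2.1 + g t0.1, t0.1)).Perm
            (pvFrontier days (pvBump g t0.1)) := by
          refine List.Perm.trans ?_ hbp.symm
          simpa using hrest
        exact ih (pvBump g t0.1) _ _ hk' hg' hperm' 

-- ------- sorted eligible names -------
theorem pvSElig_perm (days : List (String × Int × Int)) (L : Int) :
    (pvSElig days L).Perm (pvElig days L) :=
  PySem.List.sorted_perm _ _ _

theorem pvElig_nodup {days : List (String × Int × Int)} (hnd : (days.map (·.1)).Nodup)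
    (L : Int) : (pvElig days L).Nodup := by
  exact List.Nodup.sublist (List.Sublist.map _ List.filter_sublist) hnd

theorem pvSElig_sorted_lt {days : List (String × Int × Int)} (hnd : (days.map (·.1)).Nodup)
    (L : Int) : (pvSElig days L).Pairwise (· < ·) := by
  have h1 : (pvSElig days L).Pairwise (· ≤ ·) := by
    simpa using PySem.List.sorted_pairwise (pvElig days L) (fun x => x)
  have h2 : (pvSElig days L).Nodup :=
    (pvSElig_perm days L).nodup_iff.mpr (pvElig_nodup hnd L)
  exact (h1.and h2).imp (fun h => lt_of_le_of_ne h.1 h.2)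

theorem pv_mem_elig {days : List (String × Int × Int)} {L : Int} {x : String} :
    x ∈ pvElig days L ↔ ∃ t ∈ days, t.1 = x ∧ t.2.1 ≤ L ∧ L < t.2.1 + t.2.2 := by
  simp only [pvElig, List.mem_map, List.mem_filter, decide_eq_true_eq]
  constructor
  · rintro ⟨t, ⟨ht, h1, h2⟩, rfl⟩
    exact ⟨t, ht, rfl, h1, h2⟩
  · rintro ⟨t, ht, rfl, h1, h2⟩
    exact ⟨t, ⟨ht, h1, h2⟩, rfl⟩

-- ------- binary search spec -------
theorem pvF_eq_zero (days : List (String × Int × Int)) (hcap : ∀ t ∈ days, 0 < t.2.2)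
    {L : Int} (h : ∀ t ∈ days, L ≤ t.2.1) : pvF days L = 0 := by
  induction days with
  | nil => simp [pvF]
  | cons a l ih =>
    have ha := hcap a (by simp)
    have hla := h a (by simp)
    have := ih (fun t ht => hcap t (by simp [ht])) (fun t ht => h t (by simp [ht]))
    simp only [pvF, List.map_cons, List.sum_cons] at *
    have : pvTerm L a = 0 := by simp only [pvTerm]; omega
    omega

theorem pvF_eq_total (days : List (String × Int × Int)) (hcap : ∀ t ∈ days, 0 < t.2.2)
    {L : Int} (h : ∀ t ∈ days, t.2.1 + t.2.2 ≤ L) : pvF days L = pvTotal days := by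
  induction days with
  | nil => simp [pvF, pvTotal]
  | cons a l ih =>
    have ha := hcap a (by simp)
    have hla := h a (by simp)
    have := ih (fun t ht => hcap t (by simp [ht])) (fun t ht => h t (by simp [ht]))
    simp only [pvF, pvTotal, List.map_cons, List.sum_cons] at *
    have : pvTerm L a = a.2.2 := by simp only [pvTerm]; omega
    omega

theorem pvBSearch_spec_aux (days : List (String × Int × Int)) (budget : Int) :
    ∀ (n : Nat) (lo hi : Int), (hi - lo).toNat ≤ n → lo < hi →
      pvF days lo ≤ budget → budget < pvF days hi →
      pvF days (pvBSearch days budget lo hi) ≤ budget ∧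
      budget < pvF days (pvBSearch days budget lo hi + 1) := by
  intro n
  induction n with
  | zero => intro lo hi hm hlt _ _; omega
  | succ n ih =>
    intro lo hi hm hlt hflo hfhi
    rw [pvBSearch]
    by_cases hgap : 1 < hi - lo
    · rw [dif_pos hgap]
      have h1 : lo + 1 ≤ PySem.Int.floordiv (lo + hi) 2 :=
        (PySem.Int.le_floordiv_iff_mul_le (by norm_num)).mpr (by omega)
      have h2 : PySem.Int.floordiv (lo + hi) 2 < hi :=
        (PySem.Int.floordiv_lt_iff_lt_mul (by norm_num)).mpr (by omega)
      by_cases hmid : pvF days (PySem.Int.floordiv (lo + hi) 2) ≤ budget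
      · rw [if_pos hmid]
        exact ih _ _ (by omega) (by omega) hmid hfhi
      · rw [if_neg hmid]
        exact ih _ _ (by omega) (by omega) hflo (by omega)
    · rw [dif_neg hgap]
      have : hi = lo + 1 := by omega
      exact ⟨hflo, this ▸ hfhi⟩

theorem pvBSearch_spec (days : List (String × Int × Int)) (budget : Int)
    (lo hi : Int) (hlt : lo < hi) (hflo : pvF days lo ≤ budget)
    (hfhi : budget < pvF days hi) :
    pvF days (pvBSearch days budget lo hi) ≤ budget ∧
    budget < pvF days (pvBSearch days budget lo hi + 1) :=
  pvBSearch_spec_aux days budget (hi - lo).toNat lo hi le_rfl hlt hflo hfhi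

theorem pv_exists_valid (days : List (String × Int × Int)) (hcap : ∀ t ∈ days, 0 < t.2.2)
    {t : Int} (h0 : 0 ≤ t) (ht : t < pvTotal days) :
    ∃ L : Int, pvF days L ≤ t ∧ t < pvF days (L + 1) := by
  have habs_nonneg : ∀ x ∈ days.map (fun t => |t.2.1|), (0 : Int) ≤ x := by
    intro x hx
    rcases List.mem_map.mp hx with ⟨u, _, rfl⟩
    exact abs_nonneg _
  have hterm_nonneg : ∀ x ∈ days.map (fun t => |t.2.1| + t.2.2), (0 : Int) ≤ x := by
    intro x hx
    rcases List.mem_map.mp hx with ⟨u, hu, rfl⟩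
    have := hcap u hu
    have := abs_nonneg u.2.1
    omega
  have hs1 : (0 : Int) ≤ (days.map (fun t => |t.2.1|)).sum := List.sum_nonneg habs_nonneg
  have hs2 : (0 : Int) ≤ (days.map (fun t => |t.2.1| + t.2.2)).sum := List.sum_nonneg hterm_nonneg
  refine ⟨pvBSearch days t (-((days.map (fun t => |t.2.1|)).sum))
    ((days.map (fun t => |t.2.1| + t.2.2)).sum + 1), ?_, ?_⟩ <;>
  · have hflo : pvF days (-((days.map (fun t => |t.2.1|)).sum)) = 0 := by
      apply pvF_eq_zero days hcap
      intro u hu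
      have h1 : |u.2.1| ≤ (days.map (fun t => |t.2.1|)).sum :=
        List.single_le_sum habs_nonneg _ (List.mem_map_of_mem hu)
      have h2 : -|u.2.1| ≤ u.2.1 := neg_abs_le _
      omega
    have hfhi : pvF days ((days.map (fun t => |t.2.1| + t.2.2)).sum + 1) = pvTotal days := by
      apply pvF_eq_total days hcap
      intro u hu
      have h1 : |u.2.1| + u.2.2 ≤ (days.map (fun t => |t.2.1| + t.2.2)).sum :=
        List.single_le_sum hterm_nonneg _ (List.mem_map_of_mem hu)
      have h2 : u.2.1 ≤ |u.2.1| := le_abs_self _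
      omega
    have := pvBSearch_spec days t (-((days.map (fun t => |t.2.1|)).sum))
      ((days.map (fun t => |t.2.1| + t.2.2)).sum + 1) (by omega) (by omega) (by omega)
    omega

-- ------- the water-fill characterisation (core) -------
theorem pv_name_inj {days : List (String × Int × Int)} (hnd : (days.map (·.1)).Nodup)
    {t u : String × Int × Int} (ht : t ∈ days) (hu : u ∈ days) (e : t.1 = u.1) : t = u := by
  induction days with
  | nil => simp at ht
  | cons a l ih =>
    simp only [List.map_cons, List.nodup_cons] at hnd
    rcases List.mem_cons.mp ht with rfl | ht' <;> rcases List.mem_cons.mp hu with rfl | hu'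
    · rfl
    · exact absurd (e ▸ List.mem_map_of_mem hu') hnd.1
    · exact absurd (e ▸ List.mem_map_of_mem ht') hnd.1
    · exact ih hnd.2 ht' hu'

theorem pv_elig_entry {days : List (String × Int × Int)} (hnd : (days.map (·.1)).Nodup)
    {u : String × Int × Int} (hu : u ∈ days) {L : Int} :
    u.1 ∈ pvElig days L ↔ (u.2.1 ≤ L ∧ L < u.2.1 + u.2.2) := by
  constructor
  · intro h
    obtain ⟨t, ht, hteq, h1, h2⟩ := pv_mem_elig.mp h
    rcases pv_name_inj hnd ht hu hteq with rfl
    exact ⟨h1, h2⟩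
  · intro h
    exact pv_mem_elig.mpr ⟨u, hu, rfl, h.1, h.2⟩

theorem pv_mem_selig {days : List (String × Int × Int)} {L : Int} {x : String} :
    x ∈ pvSElig days L ↔ x ∈ pvElig days L := (pvSElig_perm days L).mem_iff

theorem pv_selig_nodup {days : List (String × Int × Int)} (hnd : (days.map (·.1)).Nodup)
    (L : Int) : (pvSElig days L).Nodup :=
  (pvSElig_perm days L).nodup_iff.mpr (pvElig_nodup hnd L)

theorem pv_afun_entry {days : List (String × Int × Int)} (hnd : (days.map (·.1)).Nodup)
    {t : String × Int × Int} (ht : t ∈ days) (L : Int) (r : Nat) :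
    pvAfun days L r t.1 = pvTerm L t + (if t.1 ∈ (pvSElig days L).take r then 1 else 0) := by
  unfold pvAfun
  rw [pvEnt?_self hnd ht]

theorem pv_not_mem_take_self {S : List String} (hS : S.Nodup) {r : Nat}
    (hr : r < S.length) : S[r] ∉ S.take r := by
  intro hmem
  rcases List.mem_take_iff_getElem.mp hmem with ⟨j, hj, hje⟩
  have hjr : j = r := (hS.getElem_inj_iff).mp hje
  omega

theorem pv_frontier_afun_min (days : List (String × Int × Int))
    (hnd : (days.map (·.1)).Nodup) (hcap : ∀ t ∈ days, 0 < t.2.2)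
    {L : Int} {r : Nat} (hr : r < (pvSElig days L).length) :
    pvHeapMin (pvFrontier days (pvAfun days L r)) = some (L, (pvSElig days L)[r]) := by
  have hSnd := pv_selig_nodup hnd L
  have hdS : (pvSElig days L)[r] ∈ pvSElig days L := List.getElem_mem hr
  obtain ⟨tstar, htstar, hteq, hb1, hb2⟩ := pv_mem_elig.mp (pv_mem_selig.mp hdS)
  have hcapt := hcap tstar htstar
  have hnotin : (pvSElig days L)[r] ∉ (pvSElig days L).take r := pv_not_mem_take_self hSnd hr
  have hval : pvAfun days L r tstar.1 = L - tstar.2.1 := by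
    rw [pv_afun_entry hnd htstar, hteq, if_neg hnotin]
    simp only [pvTerm]
    omega
  apply pvHeapMin_eq
  · refine pv_mem_frontier.mpr ⟨tstar, htstar, hteq, ?_, ?_⟩
    · rw [hval]; omega
    · rw [hval]; omega
  · intro x hx
    rcases pv_mem_frontier.mp hx with ⟨u, hu, hnm, hlt, hlev⟩
    have hcapu := hcap u hu
    have hav : pvAfun days L r u.1 = pvTerm L u +
        (if u.1 ∈ (pvSElig days L).take r then 1 else 0) := pv_afun_entry hnd hu L r
    rw [pvLexLt_false_iff_toLex, Prod.Lex.le_iff]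
    simp only [ofLex_toLex]
    have htake_elig : u.1 ∈ (pvSElig days L).take r → (u.2.1 ≤ L ∧ L < u.2.1 + u.2.2) := by
      intro h
      exact (pv_elig_entry hnd hu).mp (pv_mem_selig.mp (List.mem_of_mem_take h))
    by_cases helig : u.2.1 ≤ L ∧ L < u.2.1 + u.2.2
    · by_cases htake : u.1 ∈ (pvSElig days L).take r
      · left
        rw [hlev, hav, if_pos htake]
        simp only [pvTerm]
        omega
      · right
        have hlevL : x.1 = L := by
          rw [hlev, hav, if_neg htake]
          simp only [pvTerm]
          omega
        refine ⟨hlevL.symm, ?_⟩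
        rw [← hnm]
        have huS : u.1 ∈ pvSElig days L :=
          pv_mem_selig.mpr ((pv_elig_entry hnd hu).mpr helig)
        rcases List.mem_iff_getElem.mp huS with ⟨j, hj, hje⟩
        have hjr : r ≤ j := by
          by_contra hh
          push_neg at hh
          exact htake (hje ▸ List.mem_take_iff_getElem.mpr ⟨j, by omega, rfl⟩)
        rcases Nat.eq_or_lt_of_le hjr with rfl | hjlt
        · exact le_of_eq hje
        · exact le_of_lt (hje ▸ (List.pairwise_iff_getElem.mp (pvSElig_sorted_lt hnd L)) r j hr hj hjlt)
    · by_cases hgt : L < u.2.1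
      · left
        have hnt : u.1 ∉ (pvSElig days L).take r := fun h => helig (htake_elig h)
        rw [hlev, hav, if_neg hnt]
        simp only [pvTerm]
        omega
      · exfalso
        have hnt : u.1 ∉ (pvSElig days L).take r := fun h => helig (htake_elig h)
        rw [hav, if_neg hnt] at hlt
        simp only [pvTerm] at hlt
        omega

theorem pv_bump_afun (days : List (String × Int × Int))
    (hnd : (days.map (·.1)).Nodup) {L : Int} {r : Nat}
    (hr : r < (pvSElig days L).length) :
    pvBump (pvAfun days L r) ((pvSElig days L)[r]) = pvAfun days L (r + 1) := by
  have hSnd := pv_selig_nodup hnd L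
  have htk : (pvSElig days L).take (r + 1) =
      (pvSElig days L).take r ++ [(pvSElig days L)[r]] := by
    rw [List.take_add_one, List.getElem?_eq_getElem hr]
    rfl
  have hnotin : (pvSElig days L)[r] ∉ (pvSElig days L).take r := pv_not_mem_take_self hSnd hr
  funext x
  rw [pvBump]
  by_cases hx : x = (pvSElig days L)[r]
  · rw [if_pos hx]
    subst hx
    have hdS : (pvSElig days L)[r] ∈ pvSElig days L := List.getElem_mem hr
    obtain ⟨tstar, htstar, hteq, _, _⟩ := pv_mem_elig.mp (pv_mem_selig.mp hdS)
    rw [← hteq, pv_afun_entry hnd htstar, pv_afun_entry hnd htstar, hteq,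
      if_neg hnotin, htk]
    rw [if_pos (List.mem_append.mpr (Or.inr (by simp)))]
    omega
  · rw [if_neg hx]
    unfold pvAfun
    cases hent : pvEnt? days x with
    | none => rfl
    | some t =>
      congr 1
      rw [htk]
      by_cases h : x ∈ (pvSElig days L).take r
      · rw [if_pos h, if_pos (List.mem_append.mpr (Or.inl h))]
      · rw [if_neg h, if_neg ?_]
        intro hmem
        rcases List.mem_append.mp hmem with hh | hh
        · exact h hh
        · obtain ⟨ht2, hteq2⟩ := pvEnt?_eq_some hent
          exact hx (by simpa using hh)

theorem pv_afun_zero (days : List (String × Int × Int)) (hcap : ∀ t ∈ days, 0 < t.2.2)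
    {L : Int} (hF : pvF days L = 0) : pvAfun days L 0 = fun _ => (0 : Int) := by
  funext x
  unfold pvAfun
  cases hent : pvEnt? days x with
  | none => rfl
  | some t =>
    obtain ⟨ht, _⟩ := pvEnt?_eq_some hent
    have h0 : ∀ u ∈ days, (fun _ => (0 : Int)) u = pvTerm L u := by
      refine pv_eq_of_sum_eq days _ _ (fun u hu => pvTerm_nonneg L u (hcap u hu)) ?_
      simp only [List.map_const']
      rw [List.sum_replicate]
      simpa [pvF] using hF.symm
    rw [List.take_zero]
    simp [← h0 t ht]

theorem pv_afun_full (days : List (String × Int × Int))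
    (hnd : (days.map (·.1)).Nodup) (hcap : ∀ t ∈ days, 0 < t.2.2) (L : Int) :
    pvAfun days L (pvSElig days L).length = fun x =>
      (match pvEnt? days x with
        | none => 0
        | some t => pvTerm (L + 1) t) := by
  funext x
  unfold pvAfun
  cases hent : pvEnt? days x with
  | none => rfl
  | some t =>
    obtain ⟨ht, hteq⟩ := pvEnt?_eq_some hent
    show pvTerm L t + (if x ∈ (pvSElig days L).take (pvSElig days L).length then 1 else 0)
        = pvTerm (L + 1) t
    rw [List.take_of_length_le le_rfl, pvTerm_succ L t (hcap t ht)]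
    congr 1
    by_cases hel : t.2.1 ≤ L ∧ L < t.2.1 + t.2.2
    · rw [if_pos hel, if_pos ?_]
      exact hteq ▸ pv_mem_selig.mpr ((pv_elig_entry hnd ht).mpr hel)
    · rw [if_neg hel, if_neg ?_]
      intro hmem
      exact hel ((pv_elig_entry hnd ht).mp (hteq ▸ pv_mem_selig.mp hmem))

theorem pv_valid_unique (days : List (String × Int × Int)) {t L L' : Int}
    (h1 : pvF days L ≤ t) (h2 : t < pvF days (L + 1))
    (h3 : pvF days L' ≤ t) (h4 : t < pvF days (L' + 1)) : L = L' := by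
  by_contra hne
  rcases lt_or_gt_of_ne hne with h | h
  · have := pvF_mono days (show L + 1 ≤ L' by omega)
    omega
  · have := pvF_mono days (show L' + 1 ≤ L by omega)
    omega

theorem pv_term_eq_cap (days : List (String × Int × Int))
    {L : Int} (hF : pvF days L = pvTotal days) : ∀ t ∈ days, pvTerm L t = t.2.2 :=
  pv_eq_of_sum_eq days _ _ (fun t _ => pvTerm_le_cap L t) (by simpa [pvF, pvTotal] using hF)

theorem pv_cap_le_total (days : List (String × Int × Int)) (hcap : ∀ t ∈ days, 0 < t.2.2)
    {t : String × Int × Int} (ht : t ∈ days) : t.2.2 ≤ pvTotal days := by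
  refine List.single_le_sum ?_ _ (List.mem_map_of_mem ht)
  intro x hx
  rcases List.mem_map.mp hx with ⟨u, hu, rfl⟩
  exact le_of_lt (hcap u hu)

theorem pv_frontier_capfun (days : List (String × Int × Int))
    (hnd : (days.map (·.1)).Nodup) : pvFrontier days (pvCapfun days) = [] := by
  unfold pvFrontier
  rw [List.filter_eq_nil_iff.mpr ?_, List.map_nil]
  intro t ht
  unfold pvCapfun
  rw [pvEnt?_self hnd ht]
  simp

theorem pv_step1_capfun (days : List (String × Int × Int))
    (hnd : (days.map (·.1)).Nodup) : pvStep1 days (pvCapfun days) = pvCapfun days := by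
  rw [pvStep1, pv_frontier_capfun days hnd]
  rfl

theorem pv_main (days : List (String × Int × Int)) (hnd : (days.map (·.1)).Nodup)
    (hcap : ∀ t ∈ days, 0 < t.2.2) :
    ∀ t : Nat,
      (∀ L : Int, pvF days L ≤ (t : Int) → (t : Int) < pvF days (L + 1) →
        pvStepN days t (fun _ => 0) = pvAfun days L ((t : Int) - pvF days L).toNat) ∧
      (pvTotal days ≤ (t : Int) → pvStepN days t (fun _ => 0) = pvCapfun days) := by
  intro t
  induction t with
  | zero =>
    constructor
    · intro L h1 h2
      have hF0 : pvF days L = 0 :=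
        le_antisymm (by exact_mod_cast h1) (pvF_nonneg days hcap L)
      rw [show ((0 : Nat) : Int) - pvF days L = 0 by omega]
      rw [show (0 : Int).toNat = 0 from rfl]
      exact (pv_afun_zero days hcap hF0).symm
    · intro htot
      funext x
      show (0 : Int) = pvCapfun days x
      unfold pvCapfun
      cases hent : pvEnt? days x with
      | none => rfl
      | some u =>
        obtain ⟨hu, _⟩ := pvEnt?_eq_some hent
        have h1 := pv_cap_le_total days hcap hu
        have h2 := hcap u hu
        simp only [Nat.cast_zero] at htot
        omega
  | succ n ih =>
    have hstep := pvStepN_succ days n (fun _ => 0)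
    have hFsucc0 : ∀ L0 : Int, pvF days (L0 + 1) = pvF days L0 + (pvElig days L0).length :=
      pvF_succ days hcap
    constructor
    · intro L h1 h2
      push_cast at h1 h2
      have hntot : (n : Int) < pvTotal days := by
        have := pvF_le_total days (L + 1)
        omega
      obtain ⟨L0, hv1, hv2⟩ := pv_exists_valid days hcap (Int.natCast_nonneg n) hntot
      have hIH := ih.1 L0 hv1 hv2
      have hr0' : (((n : Int) - pvF days L0).toNat : Int) = (n : Int) - pvF days L0 :=
        Int.toNat_of_nonneg (by omega)
      have hSlen : (pvSElig days L0).length = (pvElig days L0).length :=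
        (pvSElig_perm days L0).length_eq
      have hr0 : ((n : Int) - pvF days L0).toNat < (pvSElig days L0).length := by
        have := hFsucc0 L0
        omega
      rw [hstep, hIH, pvStep1, pv_frontier_afun_min days hnd hcap hr0]
      show pvBump (pvAfun days L0 ((n : Int) - pvF days L0).toNat)
          ((pvSElig days L0)[((n : Int) - pvF days L0).toNat]) = _
      rw [pv_bump_afun days hnd hr0]
      by_cases hcase : ((n : Int) - pvF days L0) + 1 < (pvElig days L0).length
      · have hvA1 : pvF days L0 ≤ (n : Int) + 1 := by omega
        have hvA2 : (n : Int) + 1 < pvF days (L0 + 1) := by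
          have := hFsucc0 L0
          omega
        have hLL : L = L0 := pv_valid_unique days h1 h2 hvA1 hvA2
        subst hLL
        congr 1
        omega
      · have hm0 : ((n : Int) - pvF days L0) + 1 = (pvElig days L0).length := by
          have := hFsucc0 L0
          omega
        have hFL1 : pvF days (L0 + 1) = (n : Int) + 1 := by
          have := hFsucc0 L0
          omega
        have hr1len : ((n : Int) - pvF days L0).toNat + 1 = (pvSElig days L0).length := by
          omega
        have hLge : L0 + 1 ≤ L := by
          by_contra hh
          push_neg at hh
          have := pvF_mono days (show L + 1 ≤ L0 + 1 by omega)
          omega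
        have hFL : pvF days L = (n : Int) + 1 := by
          have := pvF_mono days hLge
          omega
        have hterm : ∀ u ∈ days, pvTerm (L0 + 1) u = pvTerm L u :=
          pv_eq_of_sum_eq days _ _ (fun u _ => pvTerm_mono hLge u)
            (show pvF days (L0 + 1) = pvF days L from by omega)
        have hrL : ((n : Int) + 1 - pvF days L).toNat = 0 := by omega
        rw [hr1len, pv_afun_full days hnd hcap L0]
        push_cast
        rw [hrL]
        funext x
        unfold pvAfun
        cases hent : pvEnt? days x with
        | none => rfl
        | some u =>
          obtain ⟨hu, _⟩ := pvEnt?_eq_some hent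
          rw [List.take_zero]
          simp [hterm u hu]
    · intro htot
      push_cast at htot
      by_cases hn : pvTotal days ≤ (n : Int)
      · rw [hstep, ih.2 hn, pv_step1_capfun days hnd]
      · have hntot : (n : Int) < pvTotal days := by omega
        obtain ⟨L0, hv1, hv2⟩ := pv_exists_valid days hcap (Int.natCast_nonneg n) hntot
        have hIH := ih.1 L0 hv1 hv2
        have hSlen : (pvSElig days L0).length = (pvElig days L0).length :=
          (pvSElig_perm days L0).length_eq
        have hr0 : ((n : Int) - pvF days L0).toNat < (pvSElig days L0).length := by
          have := hFsucc0 L0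
          omega
        rw [hstep, hIH, pvStep1, pv_frontier_afun_min days hnd hcap hr0]
        show pvBump (pvAfun days L0 ((n : Int) - pvF days L0).toNat)
            ((pvSElig days L0)[((n : Int) - pvF days L0).toNat]) = _
        rw [pv_bump_afun days hnd hr0]
        have hFL1le : pvF days (L0 + 1) ≤ pvTotal days := pvF_le_total days (L0 + 1)
        have hm0 : ((n : Int) - pvF days L0) + 1 = (pvElig days L0).length := by
          have := hFsucc0 L0
          omega
        have hFL1 : pvF days (L0 + 1) = pvTotal days := by
          have := hFsucc0 L0
          omega
        have hr1len : ((n : Int) - pvF days L0).toNat + 1 = (pvSElig days L0).length := by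
          omega
        rw [hr1len, pv_afun_full days hnd hcap L0]
        funext x
        unfold pvCapfun
        cases hent : pvEnt? days x with
        | none => rfl
        | some u =>
          obtain ⟨hu, _⟩ := pvEnt?_eq_some hent
          exact pv_term_eq_cap days hFL1 u hu

-- ------- assembling the two ports -------
theorem pv_alloc0 (ks : List String) (hnd : ks.Nodup) :
    (PySem.Dict.ofList (ks.map (fun day => (day, (0 : Int))))).keys = ks ∧
    ∀ x, (PySem.Dict.ofList (ks.map (fun day => (day, (0 : Int))))).getD x 0 = 0 := by
  have hitems : (PySem.Dict.ofList (ks.map (fun day => (day, (0 : Int))))).items =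
      ks.map (fun day => (day, (0 : Int))) := by
    have h := PySem.Dict.items_foldl_insert_fresh (ks.map (fun day => (day, (0 : Int))))
      (·.1) (·.2) PySem.Dict.empty (fun a _ => PySem.Dict.contains_empty _)
      (by simpa [Function.comp_def] using hnd)
    simpa [List.map_map] using h
  have hkeys : (PySem.Dict.ofList (ks.map (fun day => (day, (0 : Int))))).keys = ks := by
    show (PySem.Dict.ofList (ks.map (fun day => (day, (0 : Int))))).items.map (·.1) = ks
    rw [hitems, List.map_map]
    simp [Function.comp_def]
  refine ⟨hkeys, fun x => ?_⟩
  by_cases hx : x ∈ ks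
  · have hmem : (x, (0 : Int)) ∈ (PySem.Dict.ofList (ks.map (fun day => (day, (0 : Int))))).items := by
      rw [hitems]
      exact List.mem_map.mpr ⟨x, hx, rfl⟩
    exact PySem.Dict.getD_of_mem_items _ hmem (by rw [hkeys]; exact hnd) 0
  · refine PySem.Dict.getD_of_not_contains _ _ ?_
    rw [← Bool.not_eq_true]
    intro hcon
    exact hx (hkeys ▸ (PySem.Dict.contains_iff_mem_keys _ _).mp hcon)

theorem pv_insertfold (f : (String × Int × Int) → Int) :
    ∀ (l : List (String × Int × Int)) (al : PySem.Dict String Int),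
      (∀ t ∈ l, t.1 ∈ al.keys) → (l.map (·.1)).Nodup →
      ((l.foldl (fun al t => al.insert t.1 (f t)) al).keys = al.keys ∧
       ∀ x, (l.foldl (fun al t => al.insert t.1 (f t)) al).getD x 0 =
         (match pvEnt? l x with
          | some t => f t
          | none => al.getD x 0)) := by
  intro l
  induction l with
  | nil => exact fun al _ _ => ⟨rfl, fun x => rfl⟩
  | cons t l' ih =>
    intro al hmem hnd
    simp only [List.map_cons, List.nodup_cons] at hnd
    have hcont : al.contains t.1 = true :=
      (PySem.Dict.contains_iff_mem_keys _ _).mpr (hmem t (by simp))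
    have hkeys : (al.insert t.1 (f t)).keys = al.keys :=
      PySem.Dict.keys_insert_of_contains al _ hcont
    have hmem' : ∀ u ∈ l', u.1 ∈ (al.insert t.1 (f t)).keys := by
      intro u hu
      rw [hkeys]
      exact hmem u (by simp [hu])
    obtain ⟨ihk, ihg⟩ := ih (al.insert t.1 (f t)) hmem' hnd.2
    simp only [List.foldl_cons]
    refine ⟨ihk.trans hkeys, fun x => ?_⟩
    rw [ihg x]
    by_cases hx : x = t.1
    · have hent : pvEnt? (t :: l') x = some t := by
        unfold pvEnt?
        rw [List.find?_cons_of_pos (by simp [hx])]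
      have hent' : pvEnt? l' x = none := by
        refine pvEnt?_eq_none fun u hu e => hnd.1 ?_
        rw [← hx, ← e]
        exact List.mem_map_of_mem hu
      rw [hent', hent]
      show (al.insert t.1 (f t)).getD x 0 = f t
      rw [PySem.Dict.getD_insert, if_pos hx]
    · have hent : pvEnt? (t :: l') x = pvEnt? l' x := by
        unfold pvEnt?
        rw [List.find?_cons_of_neg (by simp [Ne.symm hx])]
      rw [hent]
      cases he : pvEnt? l' x with
      | some u => rfl
      | none =>
        show (al.insert t.1 (f t)).getD x 0 = al.getD x 0
        rw [PySem.Dict.getD_insert, if_neg hx]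

theorem pv_modifyfold_keys :
    ∀ (l : List String) (al : PySem.Dict String Int),
      (∀ x ∈ l, x ∈ al.keys) →
      (l.foldl (fun al day => al.modify day 0 (· + 1)) al).keys = al.keys := by
  intro l
  induction l with
  | nil => exact fun al _ => rfl
  | cons d l' ih =>
    intro al hmem
    have hcont : al.contains d = true :=
      (PySem.Dict.contains_iff_mem_keys _ _).mpr (hmem d (by simp))
    have hkeys : (al.modify d 0 (· + 1)).keys = al.keys := by
      rw [PySem.Dict.keys_modify, PySem.Dict.keys_insert_of_contains al _ hcont]
    simp only [List.foldl_cons]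
    rw [ih _ (fun x hx => hkeys ▸ hmem x (by simp [hx])), hkeys]

theorem pv_triple (L : Int) :
    ∀ (l : List (String × Int × Int)) (al : PySem.Dict String Int) (s : Int) (ps : List String),
      l.foldl (fun (st : PySem.Dict String Int × Int × List String) t =>
          (st.1.insert t.1 (pvTerm L t), st.2.1 + pvTerm L t,
           if t.2.1 ≤ L ∧ L < t.2.1 + t.2.2 then st.2.2 ++ [t.1] else st.2.2)) (al, s, ps) =
      (l.foldl (fun al t => al.insert t.1 (pvTerm L t)) al, s + pvF l L, ps ++ pvElig l L) := by
  intro l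
  induction l with
  | nil => intro al s ps; simp [pvF, pvElig]
  | cons t l' ih =>
    intro al s ps
    simp only [List.foldl_cons]
    rw [ih]
    by_cases hc : t.2.1 ≤ L ∧ L < t.2.1 + t.2.2
    · rw [if_pos hc]
      refine Prod.ext rfl (Prod.ext ?_ ?_)
      · show s + pvTerm L t + pvF l' L = s + pvF (t :: l') L
        simp only [pvF, List.map_cons, List.sum_cons]
        ring
      · show (ps ++ [t.1]) ++ pvElig l' L = ps ++ pvElig (t :: l') L
        simp [pvElig, List.filter_cons, hc]
    · rw [if_neg hc]
      refine Prod.ext rfl (Prod.ext ?_ ?_)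
      · show s + pvTerm L t + pvF l' L = s + pvF (t :: l') L
        simp only [pvF, List.map_cons, List.sum_cons]
        ring
      · show ps ++ pvElig l' L = ps ++ pvElig (t :: l') L
        simp [pvElig, List.filter_cons, hc]

-- ===== VERDICT (by name: the statement is the Claim_ definition above) =====
theorem allocate_budget_across_days_spec : Claim_equal_allocate_budget_across_days := by
  intro u c budget _
  unfold Spec_allocate_budget_across_days
  simp only [allocate_budget_across_days, allocate_budget_across_days_alt]
  by_cases hb : budget ≤ 0
  · rw [if_pos hb, if_pos hb]
  · rw [if_neg hb, if_neg hb]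
    have hb' : 0 < budget := by omega
    set ud := PySem.Dict.ofList u with hud_def
    set cd := PySem.Dict.ofList c with hcd_def
    set days := (ud.items.filter (fun p => decide (0 < p.2))).map
      (fun p => (p.1, cd.getD p.1 0, p.2)) with hdays_def
    set alloc0 := PySem.Dict.ofList (ud.keys.map (fun day => (day, (0 : Int)))) with halloc0_def
    have hksnd : ud.keys.Nodup := PySem.Dict.nodup_keys_ofList u
    have hnd : (days.map (·.1)).Nodup := by
      rw [hdays_def, List.map_map]
      exact List.Nodup.sublist (List.Sublist.map _ List.filter_sublist) hksnd
    have hcap : ∀ t ∈ days, 0 < t.2.2 := by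
      intro t ht
      rw [hdays_def] at ht
      rcases List.mem_map.mp ht with ⟨p, hp, rfl⟩
      simpa using (List.mem_filter.mp hp).2
    have hud : ∀ t ∈ days, ud.getD t.1 0 = t.2.2 := by
      intro t ht
      rw [hdays_def] at ht
      rcases List.mem_map.mp ht with ⟨p, hp, rfl⟩
      have hpi : (p.1, p.2) ∈ ud.items := by
        simpa using List.mem_of_mem_filter hp
      exact PySem.Dict.getD_of_mem_items _ hpi hksnd 0
    have hks : ∀ t ∈ days, t.1 ∈ ud.keys := by
      intro t ht
      rw [hdays_def] at ht
      rcases List.mem_map.mp ht with ⟨p, hp, rfl⟩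
      exact PySem.Dict.mem_keys_of_mem_items _ (List.mem_of_mem_filter hp)
    obtain ⟨hA0keys, hA0getD⟩ := pv_alloc0 ud.keys hksnd
    rw [← halloc0_def] at hA0keys hA0getD
    have hheap : pvFrontier days (fun _ => 0)
        = (ud.items.filter (fun p => decide (0 < p.2))).map (fun p => (cd.getD p.1 0, p.1)) := by
      unfold pvFrontier
      rw [List.filter_eq_self.mpr (fun t ht => by simpa using hcap t ht), hdays_def, List.map_map]
      exact List.map_congr_left (fun p hp => by simp)
    have hperm : ((ud.items.filter (fun p => decide (0 < p.2))).map
        (fun p => (cd.getD p.1 0, p.1))).Perm (pvFrontier days (fun _ => 0)) := by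
      rw [hheap]
    have hsync := pvALoop_sync ud days hud hks hnd budget.toNat (fun _ => 0)
      alloc0 _ hA0keys hA0getD hperm
    obtain ⟨hAkeys, hAgetD⟩ := hsync
    have hbn : ((budget.toNat : Int)) = budget := Int.toNat_of_nonneg (by omega)
    have hmain := pv_main days hnd hcap budget.toNat
    by_cases htot : (days.map (fun t => t.2.2)).sum ≤ budget
    · rw [if_pos htot]
      obtain ⟨hBkeys, hBgetD⟩ := pv_insertfold (fun t => t.2.2) days alloc0
        (fun t ht => by rw [hA0keys]; exact hks t ht) hnd
      have hAnodup := hksnd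
      rw [← hAkeys] at hAnodup
      have hBnodup := hksnd
      rw [← hA0keys, ← hBkeys] at hBnodup
      rw [PySem.Dict.items_eq_map_keys _ hAnodup 0,
        PySem.Dict.items_eq_map_keys _ hBnodup 0, hAkeys, hBkeys, hA0keys]
      refine List.map_congr_left fun k hk => Prod.ext rfl ?_
      show _ = (days.foldl (fun al t => al.insert t.1 t.2.2) alloc0).getD k 0
      rw [hAgetD k, hBgetD k, hmain.2 (by rw [hbn]; exact htot)]
      unfold pvCapfun
      cases hent : pvEnt? days k with
      | none =>
        show (0 : Int) = alloc0.getD k 0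
        rw [hA0getD]
      | some t => rfl
    · rw [if_neg htot]
      have htot' : budget < pvTotal days := by
        simp only [pvTotal]
        omega
      have hdne : days ≠ [] := by
        intro h
        rw [h] at htot'
        simp [pvTotal] at htot'
        omega
      have hlo_le : ∀ t ∈ days, PySem.List.minD (days.map (fun t => t.2.1)) (fun x => x) 0 ≤ t.2.1 :=
        fun t ht => PySem.List.minD_id_le _ 0 _ (List.mem_map_of_mem ht)
      have hhi_ge : ∀ t ∈ days,
          t.2.1 + t.2.2 ≤ PySem.List.maxD (days.map (fun t => t.2.1 + t.2.2)) (fun x => x) 0 :=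
        fun t ht => PySem.List.le_maxD_id _ 0 _ (List.mem_map_of_mem ht)
      obtain ⟨t0, ht0⟩ := List.exists_mem_of_ne_nil days hdne
      have hlohi : PySem.List.minD (days.map (fun t => t.2.1)) (fun x => x) 0
          < PySem.List.maxD (days.map (fun t => t.2.1 + t.2.2)) (fun x => x) 0 := by
        have h1 := hlo_le t0 ht0
        have h2 := hhi_ge t0 ht0
        have h3 := hcap t0 ht0
        omega
      have hFlo : pvF days (PySem.List.minD (days.map (fun t => t.2.1)) (fun x => x) 0) = 0 :=
        pvF_eq_zero days hcap hlo_le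
      have hFhi : pvF days (PySem.List.maxD (days.map (fun t => t.2.1 + t.2.2)) (fun x => x) 0)
          = pvTotal days := pvF_eq_total days hcap hhi_ge
      obtain ⟨hspec1, hspec2⟩ := pvBSearch_spec days budget _ _ hlohi (by omega) (by omega)
      set L := pvBSearch days budget (PySem.List.minD (days.map (fun t => t.2.1)) (fun x => x) 0)
        (PySem.List.maxD (days.map (fun t => t.2.1 + t.2.2)) (fun x => x) 0) with hL_def
      rw [pv_triple L days alloc0 0 []]
      dsimp only
      simp only [zero_add, List.nil_append]
      have hr_nonneg : (0 : Int) ≤ budget - pvF days L := by omega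
      rw [PySem.List.slice_to _ hr_nonneg]
      obtain ⟨hBkeys, hBgetD⟩ := pv_insertfold (fun t => pvTerm L t) days alloc0
        (fun t ht => by rw [hA0keys]; exact hks t ht) hnd
      have hSnodup : (pvSElig days L).Nodup := pv_selig_nodup hnd L
      have hchnodup : ((pvSElig days L).take (budget - pvF days L).toNat).Nodup :=
        List.Nodup.sublist (List.take_sublist ..) hSnodup
      have hchosen_keys : ∀ x ∈ (PySem.List.sorted (pvElig days L) (fun x => x) false).take
          (budget - pvF days L).toNat,
          x ∈ (days.foldl (fun al t => al.insert t.1 (pvTerm L t)) alloc0).keys := by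
        intro x hx
        obtain ⟨t, ht, hteq, _, _⟩ := pv_mem_elig.mp (pv_mem_selig.mp (List.mem_of_mem_take hx))
        rw [hBkeys, hA0keys]
        exact hteq ▸ hks t ht
      have hBfk := pv_modifyfold_keys _ _ hchosen_keys
      have hAnodup := hksnd
      rw [← hAkeys] at hAnodup
      have hBnodup := hksnd
      rw [← hA0keys, ← hBkeys, ← hBfk] at hBnodup
      rw [PySem.Dict.items_eq_map_keys _ hAnodup 0,
        PySem.Dict.items_eq_map_keys _ hBnodup 0, hAkeys, hBfk, hBkeys, hA0keys]
      refine List.map_congr_left fun k hk => Prod.ext rfl ?_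
      have hA := hmain.1 L (by rw [hbn]; exact hspec1) (by rw [hbn]; exact hspec2)
      rw [hbn] at hA
      show (pvALoop ud budget.toNat alloc0 _).getD k 0 = _
      rw [hAgetD k, hA, PySem.Dict.getD_foldl_modify_add_one, hBgetD k]
      unfold pvAfun
      cases hent : pvEnt? days k with
      | none =>
        have hnotin : k ∉ (pvSElig days L).take (budget - pvF days L).toNat := by
          intro hx
          obtain ⟨t, ht, hteq, _, _⟩ := pv_mem_elig.mp (pv_mem_selig.mp (List.mem_of_mem_take hx))
          rw [← hteq, pvEnt?_self hnd ht] at hent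
          simp at hent
        show (0 : Int) = alloc0.getD k 0 +
          ((pvSElig days L).take (budget - pvF days L).toNat).count k
        rw [hA0getD, List.count_eq_zero.mpr hnotin]
        simp
      | some t =>
        show pvTerm L t + (if k ∈ (pvSElig days L).take (budget - pvF days L).toNat then 1 else 0)
            = pvTerm L t + ((pvSElig days L).take (budget - pvF days L).toNat).count k
        by_cases hmem : k ∈ (pvSElig days L).take (budget - pvF days L).toNat
        · rw [if_pos hmem, List.count_eq_one_of_mem hchnodup hmem]
          simp
        · rw [if_neg hmem, List.count_eq_zero.mpr hmem]
          simp
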